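-- pv_equiv track=rewrite | github.com/David-Stelter/Uebungen | two_sum_problem.py | find_sum_pairs_for_range
-- ===== SOURCE A (Python) =====
-- def find_sum_pairs_for_range(target_sum):
--     """
--     Finds pairs of numbers from the range(target_sum) that add up to target_sum.
--     """
--     integers = list(range(target_sum))
--     pairs = []
--     for i in range(len(integers)):
--         for j in range(i + 1, len(integers)):
--             if integers[i] + integers[j] == target_sum:
--                 pairs.append((integers[i], integers[j]))
--     return pairs
-- ===== SOURCE B (Python) =====
-- def find_sum_pairs_for_range(target_sum):
--     """
--     Finds pairs of numbers from the range(target_sum) that add up to target_sum.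
--     Closed form: the pairs are exactly (i, target_sum - i) for 1 <= i < target_sum - i.
--     """
--     return [(i, target_sum - i) for i in range(1, (target_sum + 1) // 2)]
-- ===== Notes on version B (the rewrite author's own statement) =====
-- stated objective: faster
-- what changed: Replaced the quadratic double loop over list(range(target_sum)) by the closed form that directly emits (i, target_sum-i) for i in range(1, (target_sum+1)//2).
import Mathlib
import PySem

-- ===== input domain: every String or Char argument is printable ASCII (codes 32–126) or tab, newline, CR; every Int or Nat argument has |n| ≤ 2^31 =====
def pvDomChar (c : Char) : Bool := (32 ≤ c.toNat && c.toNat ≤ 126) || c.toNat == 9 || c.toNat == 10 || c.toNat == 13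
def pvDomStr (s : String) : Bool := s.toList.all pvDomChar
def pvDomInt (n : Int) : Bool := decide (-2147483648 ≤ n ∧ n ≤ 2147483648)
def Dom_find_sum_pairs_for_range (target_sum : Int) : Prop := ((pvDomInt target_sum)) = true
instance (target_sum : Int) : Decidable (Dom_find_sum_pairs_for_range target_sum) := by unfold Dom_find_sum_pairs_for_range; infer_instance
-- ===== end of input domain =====

-- B replaces A's quadratic double scan over list(range(target_sum)) by the closed form
-- emitting (i, target_sum - i) for i in range(1, (target_sum + 1) // 2) (objective: faster).

-- ===== PORT A =====
def find_sum_pairs_for_range (target_sum : Int) : List (Int × Int) :=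
  let integers := PySem.List.pyRange 0 target_sum 1
  let n : Int := integers.length
  (PySem.List.pyRange 0 n 1).foldl (fun pairs i =>
    (PySem.List.pyRange (i + 1) n 1).foldl (fun pairs j =>
      if PySem.List.pyGetD integers i 0 + PySem.List.pyGetD integers j 0 == target_sum then
        pairs ++ [(PySem.List.pyGetD integers i 0, PySem.List.pyGetD integers j 0)]
      else pairs) pairs) ([] : List (Int × Int))

-- ===== PORT B =====
def find_sum_pairs_for_range_alt (target_sum : Int) : List (Int × Int) :=
  (PySem.List.pyRange 1 (PySem.Int.floordiv (target_sum + 1) 2) 1).map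
    (fun i => (i, target_sum - i))

-- ===== PRECONDITION & SPEC =====
def Spec_find_sum_pairs_for_range (target_sum : Int) (out : List (Int × Int)) : Prop := out = find_sum_pairs_for_range_alt target_sum
instance (target_sum : Int) (out : List (Int × Int)) : Decidable (Spec_find_sum_pairs_for_range target_sum out) := by unfold Spec_find_sum_pairs_for_range; infer_instance

-- ===== CLAIM (what is proved, stated in full; the proofs are below) =====
def Claim_equal_find_sum_pairs_for_range : Prop := ∀ (target_sum : Int), Dom_find_sum_pairs_for_range target_sum → Spec_find_sum_pairs_for_range target_sum (find_sum_pairs_for_range target_sum)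

-- ===== LEMMAS AND PROOFS =====

-- strictly increasing Int lists with the same members are equal
lemma eq_of_pairwise_lt_of_mem_iff (l1 l2 : List Int)
    (h1 : l1.Pairwise (· < ·)) (h2 : l2.Pairwise (· < ·))
    (hm : ∀ x, x ∈ l1 ↔ x ∈ l2) : l1 = l2 := by
  exact List.Perm.eq_of_pairwise (fun a b _ _ hab hba => absurd hab (by omega)) h1 h2
    ((List.perm_ext_iff_of_nodup (h1.imp (fun h => ne_of_lt h)) (h2.imp (fun h => ne_of_lt h))).mpr hm)

-- A's inner scan keeps at most the single match j = t - i
lemma inner_filter (i t a b : Int) :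
    (PySem.List.pyRange a b 1).filter (fun j => i + j == t) =
      if a ≤ t - i ∧ t - i < b then [t - i] else [] := by
  apply eq_of_pairwise_lt_of_mem_iff
  · exact (PySem.List.pairwise_lt_pyRange_one a b).filter _
  · split_ifs <;> simp
  · intro x
    simp only [List.mem_filter, PySem.List.mem_pyRange_one, beq_iff_eq]
    split_ifs with h <;> simp <;> omega

lemma flatMap_ite {α : Type} (l : List Int) (P : Int → Prop) [DecidablePred P] (f : Int → α) :
    l.flatMap (fun i => if P i then [f i] else []) = (l.filter (fun i => decide (P i))).map f := by
  induction l with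
  | nil => rfl
  | cons x xs ih => by_cases h : P x <;> simp [List.flatMap_cons, h, ih]

lemma find_sum_pairs_main (t : Int) :
    find_sum_pairs_for_range t = find_sum_pairs_for_range_alt t := by
  unfold find_sum_pairs_for_range find_sum_pairs_for_range_alt
  have hN : ((PySem.List.pyRange 0 t 1).length : Int) = max t 0 := by
    rw [PySem.List.length_pyRange_one]; omega
  have hget : ∀ i : Int, 0 ≤ i → i < max t 0 →
      PySem.List.pyGetD (PySem.List.pyRange 0 t 1) i 0 = i := by
    intro i h0 hlt
    rw [PySem.List.pyGetD_eq_getElem _ _ h0 (by rw [PySem.List.length_pyRange_one]; omega),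
        PySem.List.getElem_pyRange_one]
    omega
  simp only [hN]
  -- step 1: replace the list indexing by the index values themselves
  rw [PySem.List.foldl_congr_mem _ _ (fun pairs i =>
      (PySem.List.pyRange (i + 1) (max t 0) 1).foldl
        (fun pairs j => if i + j == t then pairs ++ [(i, j)] else pairs) pairs) _
      (by
        intro acc i hi
        rw [PySem.List.mem_pyRange_one] at hi
        refine PySem.List.foldl_congr_mem _ _ _ _ ?_
        intro acc2 j hj
        rw [PySem.List.mem_pyRange_one] at hj
        rw [hget i hi.1 hi.2, hget j (by omega) hj.2])]
  -- step 2: the inner loop appends the filtered range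
  rw [PySem.List.foldl_congr_mem _ _ (fun pairs i =>
      pairs ++ ((PySem.List.pyRange (i + 1) (max t 0) 1).filter (fun j => i + j == t)).map
        (fun j => (i, j))) _
      (fun acc i _ => PySem.List.foldl_append_if _ _ _ _)]
  -- step 3: the outer loop is a flatMap
  rw [PySem.List.foldl_append_eq_flatMap]
  -- step 4: evaluate the filter — at most one partner per i
  have : ∀ i ∈ PySem.List.pyRange 0 (max t 0) 1,
      ((PySem.List.pyRange (i + 1) (max t 0) 1).filter (fun j => i + j == t)).map (fun j => (i, j))
        = if i + 1 ≤ t - i ∧ t - i < max t 0 then [(i, t - i)] else [] := by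
    intro i _
    rw [inner_filter]
    split_ifs <;> simp
  rw [List.flatMap_congr this, flatMap_ite, List.nil_append]
  -- step 5: the surviving indices are exactly range(1, (t+1)//2)
  have hranges : (PySem.List.pyRange 0 (max t 0) 1).filter
      (fun i => decide (i + 1 ≤ t - i ∧ t - i < max t 0))
      = PySem.List.pyRange 1 (PySem.Int.floordiv (t + 1) 2) 1 := by
    apply eq_of_pairwise_lt_of_mem_iff
    · exact (PySem.List.pairwise_lt_pyRange_one _ _).filter _
    · exact PySem.List.pairwise_lt_pyRange_one _ _
    · intro x
      have hd : x < PySem.Int.floordiv (t + 1) 2 ↔ 2 * x < t := by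
        rw [Int.lt_iff_add_one_le, PySem.Int.le_floordiv_iff_mul_le (by norm_num)]
        omega
      simp only [List.mem_filter, PySem.List.mem_pyRange_one, decide_eq_true_eq]
      omega
  rw [hranges]

-- ===== VERDICT (by name: the statement is the Claim_ definition above) =====
theorem find_sum_pairs_for_range_spec : Claim_equal_find_sum_pairs_for_range := by
  intro t _
  unfold Spec_find_sum_pairs_for_range
  exact find_sum_pairs_main t
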